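-- pv_equiv track=rewrite | github.com/k5sano/patent-compare | modules/prompt_generator.py | _find_matching_claims
-- ===== SOURCE A (Python) =====
-- def _find_matching_claims(claims, terms, max_hits=3):
--     if not terms or not claims:
--         return []
--     out = []
--     for cl in claims:
--         text = cl.get("text", "") or ""
--         if any(t in text for t in terms if t):
--             out.append(cl)
--             if len(out) >= max_hits:
--                 break
--     return out
-- ===== SOURCE B (Python) =====
-- def _find_matching_claims(claims, terms, max_hits=3):
--     pats = [t for t in terms if t]
--     if not pats:
--         return []
--
--     def matches(text):
--         # naive multi-pattern scan: one left-to-right pass over the text,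
--         # checking at each position whether any pattern starts there
--         n = len(text)
--         for i in range(n + 1):
--             for p in pats:
--                 if text.startswith(p, i):
--                     return True
--         return False
--
--     def pick(rest, budget):
--         if budget <= 0 or not rest:
--             return []
--         cl, tail = rest[0], rest[1:]
--         if matches(cl.get("text") or ""):
--             return [cl] + pick(tail, budget - 1)
--         return pick(tail, budget)
--
--     return pick(claims, max_hits)
-- ===== Notes on version B (the rewrite author's own statement) =====
-- stated objective: alternative
-- what changed: B replaces A's break-early accumulator loop with per-term 'in' substring tests by a recursive budgeted selection whose matcher is a single left-to-right position scan over each text checking whether any (prefiltered nonempty) pattern starts at that position (a naive multi-pattern matcher).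
-- intended difference: When max_hits <= 0 and some claim's text contains a nonempty term, A still returns the first matching claim (append happens before the cap check) while B returns [], the intended value since max_hits is a cap on the number of results. — e.g. on _find_matching_claims([[("text", "abc")]], ["b"], 0): A returns [[("text", "abc")]], B returns []
import Mathlib
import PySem

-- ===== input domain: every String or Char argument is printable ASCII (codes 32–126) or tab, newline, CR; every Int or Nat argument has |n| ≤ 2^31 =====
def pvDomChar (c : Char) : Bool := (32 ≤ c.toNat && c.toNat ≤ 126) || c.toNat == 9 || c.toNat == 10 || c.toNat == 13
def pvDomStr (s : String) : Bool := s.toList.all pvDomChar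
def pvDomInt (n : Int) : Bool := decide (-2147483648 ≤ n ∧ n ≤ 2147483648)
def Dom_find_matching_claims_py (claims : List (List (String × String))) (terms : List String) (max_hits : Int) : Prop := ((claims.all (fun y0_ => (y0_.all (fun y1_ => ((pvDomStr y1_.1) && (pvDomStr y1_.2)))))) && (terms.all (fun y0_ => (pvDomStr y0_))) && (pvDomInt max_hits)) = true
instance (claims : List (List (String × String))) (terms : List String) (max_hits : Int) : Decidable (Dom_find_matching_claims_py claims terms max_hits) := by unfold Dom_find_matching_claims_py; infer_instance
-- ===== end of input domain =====

-- ===== PORT A =====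
-- B replaces A's break-early loop with per-term substring tests by a recursive budgeted selection
-- whose matcher is a single position scan over each text checking pattern prefixes (alternative);
-- on max_hits <= 0 with a match A returns one claim, B returns [] (stated as D_).

-- text = cl.get("text", "") or ""
def pvTextOf (cl : List (String × String)) : String :=
  let t := (cl.lookup "text").getD ""   -- dict.get: first match, per the assoc-list convention
  if t = "" then "" else t

-- any(t in text for t in terms if t)
def pvMatchA (terms : List String) (text : String) : Bool :=
  terms.any (fun t => decide (t ≠ "") && PySem.Str.isIn t text)

-- the for-loop of A, with out as accumulator and the break
def pvGoA (terms : List String) (max_hits : Int) :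
    List (List (String × String)) → List (List (String × String)) → List (List (String × String))
  | [], out => out
  | cl :: rest, out =>
    let text := pvTextOf cl
    if pvMatchA terms text then
      let out' := out ++ [cl]
      if max_hits ≤ (out'.length : Int) then out'
      else pvGoA terms max_hits rest out'
    else pvGoA terms max_hits rest out

def find_matching_claims_py (claims : List (List (String × String))) (terms : List String) (max_hits : Int) : List (List (String × String)) :=
  if terms = [] ∨ claims = [] then []
  else pvGoA terms max_hits claims []

-- ===== PORT B =====
-- text = cl.get("text") or ""
def pvTextB (cl : List (String × String)) : String :=
  let t := (cl.lookup "text").getD ""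
  if t = "" then "" else t

-- matches(text): one pass over positions 0..len(text); text.startswith(p, i) is exactly
-- "p.toList is a prefix of text.toList.drop i" for 0 ≤ i (exact on this domain)
def pvMatchesB (pats : List String) (text : String) : Bool :=
  let cs := text.toList
  (List.range (cs.length + 1)).any (fun i => pats.any (fun p => p.toList.isPrefixOf (cs.drop i)))

-- pick(rest, budget)
def pvPickB (pats : List String) : List (List (String × String)) → Int → List (List (String × String))
  | rest, budget =>
    if budget ≤ 0 then []
    else match rest with
      | [] => []
      | cl :: tail =>
        if pvMatchesB pats (pvTextB cl) then cl :: pvPickB pats tail (budget - 1)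
        else pvPickB pats tail budget

def find_matching_claims_py_alt (claims : List (List (String × String))) (terms : List String) (max_hits : Int) : List (List (String × String)) :=
  let pats := terms.filter (fun t => t ≠ "")
  if pats = [] then [] else pvPickB pats claims max_hits

-- ===== PRECONDITION & SPEC =====
-- When max_hits <= 0 and some claim's text contains a nonempty term, A returns the first matching
-- claim (it appends before checking the cap) while B returns []; [] is the intended value, since
-- max_hits caps the number of results.
def D_find_matching_claims_py (claims : List (List (String × String))) (terms : List String) (max_hits : Int) : Prop :=
  max_hits ≤ 0 ∧ ∃ cl ∈ claims, ∃ t ∈ terms, t ≠ "" ∧ t.toList <:+: ((cl.lookup "text").getD "").toList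
instance (claims : List (List (String × String))) (terms : List String) (max_hits : Int) : Decidable (D_find_matching_claims_py claims terms max_hits) := by unfold D_find_matching_claims_py; infer_instance

def Spec_find_matching_claims_py (claims : List (List (String × String))) (terms : List String) (max_hits : Int) (out : List (List (String × String))) : Prop := ¬ D_find_matching_claims_py claims terms max_hits → out = find_matching_claims_py_alt claims terms max_hits
instance (claims : List (List (String × String))) (terms : List String) (max_hits : Int) (out : List (List (String × String))) : Decidable (Spec_find_matching_claims_py claims terms max_hits out) := by unfold Spec_find_matching_claims_py; infer_instance

def pvDiffWitness_find_matching_claims_py : (List (List (String × String))) × List String × Int :=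
  ([[("text", "abc")]], ["b"], 0)
def pvDiffWitnessOut_find_matching_claims_py : (List (List (String × String))) × (List (List (String × String))) :=
  ([[("text", "abc")]], [])

-- ===== CLAIM (what is proved, stated in full; the proofs are below) =====
def Claim_unchanged_find_matching_claims_py : Prop := ∀ (claims : List (List (String × String))) (terms : List String) (max_hits : Int), Dom_find_matching_claims_py claims terms max_hits → Spec_find_matching_claims_py claims terms max_hits (find_matching_claims_py claims terms max_hits)
def Claim_changed_find_matching_claims_py : Prop := Dom_find_matching_claims_py (pvDiffWitness_find_matching_claims_py.1) (pvDiffWitness_find_matching_claims_py.2.1) (pvDiffWitness_find_matching_claims_py.2.2) ∧ D_find_matching_claims_py (pvDiffWitness_find_matching_claims_py.1) (pvDiffWitness_find_matching_claims_py.2.1) (pvDiffWitness_find_matching_claims_py.2.2) ∧ find_matching_claims_py (pvDiffWitness_find_matching_claims_py.1) (pvDiffWitness_find_matching_claims_py.2.1) (pvDiffWitness_find_matching_claims_py.2.2) = pvDiffWitnessOut_find_matching_claims_py.1 ∧ find_matching_claims_py_alt (pvDiffWitness_find_matching_claims_py.1) (pvDiffWitness_find_matching_claims_py.2.1) (pvDiffWitness_find_matching_claims_py.2.2)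 = pvDiffWitnessOut_find_matching_claims_py.2 ∧ pvDiffWitnessOut_find_matching_claims_py.1 ≠ pvDiffWitnessOut_find_matching_claims_py.2
def Claim_exact_find_matching_claims_py : Prop := ∀ (claims : List (List (String × String))) (terms : List String) (max_hits : Int), Dom_find_matching_claims_py claims terms max_hits → D_find_matching_claims_py claims terms max_hits → find_matching_claims_py claims terms max_hits ≠ find_matching_claims_py_alt claims terms max_hits

-- ===== LEMMAS AND PROOFS =====

-- B's position scan decides exactly "some nonempty pattern is a substring"
theorem pvMatchesB_eq (terms : List String) (text : String) :
    pvMatchesB (terms.filter (fun t => t ≠ "")) text = pvMatchA terms text := by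
  rw [Bool.eq_iff_iff]
  simp only [pvMatchesB, pvMatchA, List.any_eq_true, List.mem_range, List.mem_filter,
    decide_eq_true_eq, Bool.and_eq_true, List.isPrefixOf_iff_prefix]
  constructor
  · rintro ⟨i, _, p, ⟨hp, hne⟩, hpre⟩
    refine ⟨p, hp, by simpa using hne, ?_⟩
    rw [PySem.Str.isIn_iff_infix]
    exact (PySem.Chars.isIn_iff_infix _ _).mp
      ((PySem.Chars.exists_prefix_drop_iff_isIn _ _).mp ⟨i, hpre⟩)
  · rintro ⟨t, ht, hne, hin⟩
    have hinf : t.toList <:+: text.toList := (PySem.Str.isIn_iff_infix _ _).mp hin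
    obtain ⟨j, hpre⟩ := (PySem.Chars.exists_prefix_drop_iff_isIn t.toList text.toList).mpr
      (by rw [PySem.Chars.isIn_iff_infix]; exact hinf)
    by_cases hj : j ≤ text.toList.length
    · exact ⟨j, by omega, t, ⟨ht, by simpa using hne⟩, hpre⟩
    · refine ⟨text.toList.length, by omega, t, ⟨ht, by simpa using hne⟩, ?_⟩
      rw [List.drop_length]
      rw [List.drop_eq_nil_of_le (by omega)] at hpre
      exact hpre

-- unfolding equations for pvPickB
theorem pvPickB_nil (pats : List String) (b : Int) : pvPickB pats [] b = [] := by
  rw [pvPickB]; split <;> rfl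

theorem pvPickB_cons (pats : List String) (cl : List (String × String))
    (tail : List (List (String × String))) (b : Int) :
    pvPickB pats (cl :: tail) b
      = if b ≤ 0 then []
        else if pvMatchesB pats (pvTextB cl) then cl :: pvPickB pats tail (b - 1)
        else pvPickB pats tail b := by
  conv_lhs => rw [pvPickB]

-- B's recursive pick is filter-then-take
theorem pvPickB_eq (pats : List String) (claims : List (List (String × String))) (m : Int) :
    pvPickB pats claims m
      = if 0 < m then (claims.filter (fun cl => pvMatchesB pats (pvTextB cl))).take m.toNat
        else [] := by
  induction claims generalizing m with
  | nil => rw [pvPickB_nil]; split_ifs <;> simp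
  | cons cl rest ih =>
    rw [pvPickB_cons]
    by_cases hm : m ≤ 0
    · rw [if_pos hm, if_neg (by omega)]
    · rw [if_neg hm, if_pos (show (0:Int) < m by omega)]
      by_cases hc : pvMatchesB pats (pvTextB cl)
      · rw [if_pos hc,
          List.filter_cons_of_pos (p := fun cl => pvMatchesB pats (pvTextB cl)) (l := rest) hc, ih]
        by_cases h1 : 0 < m - 1
        · rw [if_pos h1]
          have : m.toNat = (m - 1).toNat + 1 := by omega
          rw [this, List.take_succ_cons]
        · rw [if_neg h1]
          have : m.toNat = 1 := by omega
          rw [this, List.take_succ_cons, List.take_zero]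
      · rw [if_neg hc,
          List.filter_cons_of_neg (p := fun cl => pvMatchesB pats (pvTextB cl)) (l := rest) (by simpa using hc),
          ih, if_pos (show (0:Int) < m by omega)]

-- B rewritten through A's per-claim predicate
theorem pvAlt_eq (claims : List (List (String × String))) (terms : List String) (m : Int) :
    find_matching_claims_py_alt claims terms m
      = if 0 < m then (claims.filter (fun cl => pvMatchA terms (pvTextOf cl))).take m.toNat
        else [] := by
  unfold find_matching_claims_py_alt
  by_cases hp : terms.filter (fun t => t ≠ "") = []
  · rw [if_pos hp]
    have hall : ∀ cl ∈ claims, pvMatchA terms (pvTextOf cl) = false := by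
      intro cl _
      simp only [pvMatchA, List.any_eq_false]
      intro t ht
      by_cases hne : t = ""
      · simp [hne]
      · exfalso
        have hmem : t ∈ terms.filter (fun t => t ≠ "") :=
          List.mem_filter.mpr ⟨ht, by simp [hne]⟩
        rw [hp] at hmem
        simp at hmem
    rw [List.filter_congr hall]
    simp
  · rw [if_neg hp, pvPickB_eq]
    have : ∀ cl ∈ claims,
        pvMatchesB (terms.filter (fun t => t ≠ "")) (pvTextB cl) = pvMatchA terms (pvTextOf cl) := by
      intro cl _; rw [pvMatchesB_eq]; rfl
    rw [List.filter_congr this]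

-- loop invariant: while the cap is not reached, A's loop produces filter-then-take
theorem pvGoA_filter (terms : List String) (m : Int) (claims : List (List (String × String)))
    (out : List (List (String × String))) (h : (out.length : Int) < m) :
    pvGoA terms m claims out
      = out ++ (claims.filter (fun cl => pvMatchA terms (pvTextOf cl))).take (m - out.length).toNat := by
  induction claims generalizing out with
  | nil => simp [pvGoA]
  | cons cl rest ih =>
    by_cases hm : pvMatchA terms (pvTextOf cl)
    · rw [List.filter_cons_of_pos (p := fun cl => pvMatchA terms (pvTextOf cl)) (l := rest) hm]
      simp only [pvGoA, hm, if_pos]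
      by_cases hcap : m ≤ ((out ++ [cl]).length : Int)
      · rw [if_pos hcap]
        have h1 : (m - (out.length : Int)).toNat = 1 := by
          simp only [List.length_append, List.length_cons, List.length_nil] at hcap; omega
        rw [h1]
        simp
      · rw [if_neg hcap, ih (out ++ [cl]) (by omega)]
        have h1 : (m - (out.length : Int)).toNat
            = (m - ((out ++ [cl]).length : Int)).toNat + 1 := by
          simp only [List.length_append, List.length_cons, List.length_nil] at hcap ⊢; omega
        rw [h1, List.take_succ_cons]
        simp
    · rw [List.filter_cons_of_neg (p := fun cl => pvMatchA terms (pvTextOf cl)) (l := rest) (by simpa using hm)]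
      simp only [pvGoA, hm, Bool.false_eq_true, if_neg, not_false_iff]
      exact ih out h

-- when no claim matches, A's loop returns the accumulator unchanged
theorem pvGoA_nomatch (terms : List String) (m : Int) (claims : List (List (String × String)))
    (out : List (List (String × String)))
    (h : ∀ cl ∈ claims, pvMatchA terms (pvTextOf cl) = false) :
    pvGoA terms m claims out = out := by
  induction claims with
  | nil => rfl
  | cons cl rest ih =>
    have h1 := h cl (by simp)
    simp only [pvGoA, h1, Bool.false_eq_true, if_neg, not_false_iff]
    exact ih fun c hc => h c (List.mem_cons_of_mem _ hc)

-- existence of a match makes A's loop return a nonempty list under a nonpositive cap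
theorem pvGoA_hit_ne_nil (terms : List String) (m : Int) (hm : m ≤ 0)
    (claims : List (List (String × String)))
    (h : ∃ cl ∈ claims, pvMatchA terms (pvTextOf cl) = true) :
    pvGoA terms m claims [] ≠ [] := by
  induction claims with
  | nil => simp at h
  | cons cl rest ih =>
    by_cases hc : pvMatchA terms (pvTextOf cl)
    · simp only [pvGoA, hc, if_pos]
      rw [if_pos (show m ≤ ((([] : List (List (String × String))) ++ [cl]).length : Int) by simp; omega)]
      simp
    · simp only [pvGoA, hc, Bool.false_eq_true, if_neg, not_false_iff]
      refine ih ?_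
      rcases h with ⟨c, hmem, hcm⟩
      rcases List.mem_cons.mp hmem with rfl | hmem'
      · exact absurd hcm (by simpa using hc)
      · exact ⟨c, hmem', hcm⟩

-- the defaulted lookup equals A's text extraction ('"" or t' is t)
theorem pvTextOf_eq (cl : List (String × String)) :
    pvTextOf cl = (cl.lookup "text").getD "" := by
  by_cases h : (cl.lookup "text").getD "" = "" <;> simp [pvTextOf, h]

-- D_'s match condition restated through A's per-claim predicate
theorem pvD_match_iff (claims : List (List (String × String))) (terms : List String) :
    (∃ cl ∈ claims, ∃ t ∈ terms, t ≠ "" ∧ t.toList <:+: ((cl.lookup "text").getD "").toList)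
      ↔ ∃ cl ∈ claims, pvMatchA terms (pvTextOf cl) = true := by
  simp only [pvMatchA, List.any_eq_true, Bool.and_eq_true, decide_eq_true_eq]
  constructor
  · rintro ⟨cl, hcl, t, ht, hne, hinf⟩
    exact ⟨cl, hcl, t, ht, hne, by rw [PySem.Str.isIn_iff_infix, pvTextOf_eq]; exact hinf⟩
  · rintro ⟨cl, hcl, t, ht, hne, hin⟩
    exact ⟨cl, hcl, t, ht, hne, by rw [← pvTextOf_eq, ← PySem.Str.isIn_iff_infix]; exact hin⟩

theorem pv_unchanged (claims : List (List (String × String))) (terms : List String) (m : Int)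
    (hD : ¬ D_find_matching_claims_py claims terms m) :
    find_matching_claims_py claims terms m = find_matching_claims_py_alt claims terms m := by
  rw [pvAlt_eq]
  unfold find_matching_claims_py
  by_cases htriv : terms = [] ∨ claims = []
  · rw [if_pos htriv]
    rcases htriv with rfl | rfl
    · have : ∀ cl ∈ claims, pvMatchA ([] : List String) (pvTextOf cl) = false := by
        intro cl _; rfl
      rw [List.filter_congr this]
      simp
    · simp
  · rw [if_neg htriv]
    by_cases hpos : 0 < m
    · rw [pvGoA_filter terms m claims [] (by simpa using hpos), if_pos hpos]
      simp
    · have hm : m ≤ 0 := by omega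
      have hnom : ∀ cl ∈ claims, pvMatchA terms (pvTextOf cl) = false := by
        intro cl hcl
        by_contra hne
        exact hD ⟨hm, (pvD_match_iff claims terms).mpr ⟨cl, hcl, by simpa using hne⟩⟩
      rw [pvGoA_nomatch terms m claims [] hnom, if_neg hpos]

-- ===== VERDICT (by name: the statement is the Claim_ definition above) =====
theorem find_matching_claims_py_spec : Claim_unchanged_find_matching_claims_py := by
  intro claims terms m _ hD
  exact pv_unchanged claims terms m hD

theorem find_matching_claims_py_changed : Claim_changed_find_matching_claims_py := by
  unfold Claim_changed_find_matching_claims_py; decide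

theorem find_matching_claims_py_tight : Claim_exact_find_matching_claims_py := by
  intro claims terms m _ hD
  rcases hD with ⟨hm, hmatch⟩
  have hne := pvGoA_hit_ne_nil terms m hm claims ((pvD_match_iff claims terms).mp hmatch)
  have hterms : terms ≠ [] := by
    rcases hmatch with ⟨_, _, t, ht, _⟩; exact fun h => by subst h; simp at ht
  have hclaims : claims ≠ [] := by
    rcases hmatch with ⟨cl, hcl, _⟩; exact fun h => by subst h; simp at hcl
  rw [pvAlt_eq, if_neg (by omega)]
  unfold find_matching_claims_py
  rw [if_neg (by tauto)]
  exact hne
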